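-- pv_equiv track=rewrite | github.com/NaNdalal-dev/hacker-rank-problems | medium/nonDivisibleSubset.py | notDivByK
-- ===== SOURCE A (Python) =====
-- def notDivByK(s,k):
-- 	l=len(s)
-- 	cnt=0
-- 	for i in range(l):
-- 		for j in range(l):
-- 			if(i!=j):
-- 				sumij=s[i]+s[j]
-- 				if(sumij%k!=0):
-- 					cnt+=1
-- 	if(cnt==l):
-- 		return True
-- 	else:
-- 		return False
-- ===== SOURCE B (Python) =====
-- def notDivByK(s, k):
--     # Remainder-frequency histogram: count divisible ordered pairs in O(n),
--     # subtract from the total number of ordered pairs, instead of A's O(n^2)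
--     # double loop.
--     l = len(s)
--     if l <= 1:
--         # no ordered pairs at all, so the pair count is 0; it equals l iff l == 0
--         return l == 0
--     freq = {}
--     for x in s:
--         r = x % k
--         freq[r] = freq.get(r, 0) + 1
--     div_pairs = 0
--     for r, c in freq.items():
--         div_pairs += c * freq.get((-r) % k, 0)
--     self_div = 0
--     for x in s:
--         if (2 * x) % k == 0:
--             self_div += 1
--     # div_pairs counts ordered pairs (i, j) incl. i == j with (s[i]+s[j]) % k == 0
--     return l * (l - 1) - (div_pairs - self_div) == l
-- ===== Notes on version B (the rewrite author's own statement) =====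
-- stated objective: faster
-- what changed: Replaced A's O(n^2) double loop over all index pairs with a remainder-frequency histogram: count the divisible ordered pairs from remainder counts (plus a diagonal correction) and subtract from n*(n-1).
import Mathlib
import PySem

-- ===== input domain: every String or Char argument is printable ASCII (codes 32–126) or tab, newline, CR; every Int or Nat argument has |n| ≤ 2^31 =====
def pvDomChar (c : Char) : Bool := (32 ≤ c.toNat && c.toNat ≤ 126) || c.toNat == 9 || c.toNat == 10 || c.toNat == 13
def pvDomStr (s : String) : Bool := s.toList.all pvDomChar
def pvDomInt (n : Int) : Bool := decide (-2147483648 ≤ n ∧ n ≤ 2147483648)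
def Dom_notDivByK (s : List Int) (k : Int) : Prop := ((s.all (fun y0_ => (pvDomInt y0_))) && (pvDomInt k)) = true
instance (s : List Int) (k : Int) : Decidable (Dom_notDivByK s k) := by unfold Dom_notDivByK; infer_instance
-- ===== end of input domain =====

-- B replaces A's O(n^2) double loop with a remainder-frequency histogram (objective: faster).

-- ===== PORT A =====
-- literal port of A's nested 'for i in range(l): for j in range(l):' counting loop
def notDivByK (s : List Int) (k : Int) : Bool :=
  let l : Int := s.length
  let cnt : Int :=
    (PySem.List.pyRange 0 l 1).foldl (fun cnt i =>
      (PySem.List.pyRange 0 l 1).foldl (fun cnt j =>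
        if i ≠ j then
          let sumij := PySem.List.pyGetD s i 0 + PySem.List.pyGetD s j 0
          if PySem.Int.mod sumij k ≠ 0 then cnt + 1 else cnt
        else cnt) cnt) 0
  decide (cnt = l)

-- ===== PORT B =====
-- literal port of Source B: remainder histogram, divisible-pair count, subtraction
def notDivByK_alt (s : List Int) (k : Int) : Bool :=
  let l : Int := s.length
  if l ≤ 1 then decide (l = 0)
  else
    let freq : PySem.Dict Int Int :=
      s.foldl (fun d x =>
        let r := PySem.Int.mod x k
        d.insert r (d.getD r 0 + 1)) PySem.Dict.empty
    let divPairs : Int :=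
      freq.items.foldl (fun acc p => acc + p.2 * freq.getD (PySem.Int.mod (-p.1) k) 0) 0
    let selfDiv : Int :=
      s.foldl (fun acc x => if PySem.Int.mod (2 * x) k = 0 then acc + 1 else acc) 0
    decide (l * (l - 1) - (divPairs - selfDiv) = l)

-- ===== PRECONDITION & SPEC =====
-- Pre_ excludes exactly the inputs where Python A raises ZeroDivisionError:
-- k = 0 with at least two elements (with fewer than two elements the guarded
-- '%' is never executed and A returns).
def Pre_notDivByK (s : List Int) (k : Int) : Prop := k ≠ 0 ∨ s.length ≤ 1
instance (s : List Int) (k : Int) : Decidable (Pre_notDivByK s k) := by unfold Pre_notDivByK; infer_instance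

def pvWitness_notDivByK : List Int × Int := ([1, 7, 2, 4], 3)

def Spec_notDivByK (s : List Int) (k : Int) (out : Bool) : Prop := out = notDivByK_alt s k
instance (s : List Int) (k : Int) (out : Bool) : Decidable (Spec_notDivByK s k out) := by unfold Spec_notDivByK; infer_instance

-- ===== CLAIM (what is proved, stated in full; the proofs are below) =====
def Claim_equal_notDivByK : Prop := ∀ (s : List Int) (k : Int), Dom_notDivByK s k → Pre_notDivByK s k → Spec_notDivByK s k (notDivByK s k)

-- ===== LEMMAS AND PROOFS =====

-- Both programs count pairs modulo k; the common normal form both reduce to: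
-- pvDfull = number of ordered pairs (i, j), including i = j, with k ∣ s[i] + s[j];
-- pvSdiag = number of indices i with k ∣ s[i] + s[i].
def pvDfull (s : List Int) (k : Int) : Int :=
  (s.map (fun x => ((s.countP (fun y => decide (k ∣ (x + y)))) : Int))).sum
def pvSdiag (s : List Int) (k : Int) : Int :=
  ((s.countP (fun x => decide (k ∣ (x + x)))) : Int)

-- Python's floored '%' identifies residue classes: a % k == b % k iff k ∣ a - b (k ≠ 0).
theorem pvModCongr (a b k : Int) (hk : k ≠ 0) :
    PySem.Int.mod a k = PySem.Int.mod b k ↔ k ∣ (a - b) := by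
  have ha := PySem.Int.floordiv_mul_add_mod a k
  have hb := PySem.Int.floordiv_mul_add_mod b k
  constructor
  · intro h
    exact ⟨PySem.Int.floordiv a k - PySem.Int.floordiv b k, by linear_combination hb - ha + h⟩
  · intro h
    have hd : k ∣ (PySem.Int.mod a k - PySem.Int.mod b k) := by
      obtain ⟨c, hc⟩ := h
      exact ⟨c - (PySem.Int.floordiv a k - PySem.Int.floordiv b k), by
        linear_combination ha - hb + hc⟩
    have hbound : |PySem.Int.mod a k - PySem.Int.mod b k| < |k| := by
      rw [abs_lt]
      rcases lt_or_gt_of_ne hk with hneg | hpos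
      · have h1 := PySem.Int.mod_neg_bounds a hneg
        have h2 := PySem.Int.mod_neg_bounds b hneg
        rw [abs_of_neg hneg]; omega
      · have h1 := PySem.Int.mod_nonneg a hpos
        have h2 := PySem.Int.mod_lt a hpos
        have h3 := PySem.Int.mod_nonneg b hpos
        have h4 := PySem.Int.mod_lt b hpos
        rw [abs_of_pos hpos]; omega
    have := Int.eq_zero_of_abs_lt_dvd ((abs_dvd _ _).mpr hd) hbound
    omega

-- the list rebuilt from A's index loop
theorem pvGetDRange (s : List Int) : (List.range s.length).map (fun i => s.getD i 0) = s := by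
  apply List.ext_getElem
  · simp
  · intro i h1 h2; simp only [List.getElem_map, List.getElem_range]
    rw [List.getD_eq_getElem s 0 (by simpa using h2)]

-- indicator sum over a nodup list containing x (used for B's histogram sum)
theorem pvSumIndicator (ys : List Int) (x : Int) (g : Int → Int) (hnd : ys.Nodup) (hx : x ∈ ys) :
    (ys.map (fun r => (if x == r then (1:Int) else 0) * g r)).sum = g x := by
  induction ys with
  | nil => cases hx
  | cons y t ih =>
    rcases List.nodup_cons.mp hnd with ⟨hy, hndt⟩
    by_cases hxy : x = y
    · subst hxy
      simp only [List.map_cons, List.sum_cons]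
      have hz : (t.map (fun r => (if x == r then (1:Int) else 0) * g r)).sum = 0 := by
        apply List.sum_eq_zero
        intro z hz
        obtain ⟨r, hr, hrz⟩ := List.mem_map.mp hz
        have : ¬ (x == r) = true := by simp; rintro rfl; exact hy hr
        simp [this] at hrz; omega
      rw [hz]; simp
    · have hxt : x ∈ t := by cases hx with | head => exact absurd rfl hxy | tail _ h => exact h
      have := ih hndt hxt
      simp only [List.map_cons, List.sum_cons]
      have hne : (x == y) = false := by simp [hxy]
      rw [hne]; simpa using this

-- summing a function of the distinct values weighted by multiplicity = summing over the list
theorem pvSumCount (xs ys : List Int) (g : Int → Int) (hnd : ys.Nodup) (hsub : ∀ x ∈ xs, x ∈ ys) :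
    (ys.map (fun r => ((xs.count r : Int)) * g r)).sum = (xs.map g).sum := by
  induction xs with
  | nil => simp
  | cons x t ih =>
    have hsubt : ∀ z ∈ t, z ∈ ys := fun z hz => hsub z (List.mem_cons_of_mem x hz)
    have hxy : x ∈ ys := hsub x List.mem_cons_self
    have hsplit : ∀ r : Int, ((x :: t).count r : Int) * g r
        = (t.count r : Int) * g r + (if x == r then (1:Int) else 0) * g r := by
      intro r
      rw [List.count_cons]
      by_cases h : x = r
      · subst h; simp; ring
      · have h2 : (x == r) = false := by simp [h]
        simp [h2]
    calc (ys.map (fun r => ((x :: t).count r : Int) * g r)).sum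
        = (ys.map (fun r => (t.count r : Int) * g r + (if x == r then (1:Int) else 0) * g r)).sum := by
          exact congrArg List.sum (List.map_congr_left (fun r _ => hsplit r))
      _ = (ys.map (fun r => (t.count r : Int) * g r)).sum
            + (ys.map (fun r => (if x == r then (1:Int) else 0) * g r)).sum := by
          rw [PySem.List.sum_map_add_int]
      _ = (t.map g).sum + g x := by rw [ih hsubt, pvSumIndicator ys x g hnd hxy]
      _ = ((x :: t).map g).sum := by simp; ring

-- removing the diagonal index from A's inner count
theorem pvCountPSplit (l : List Nat) (a : Nat) (P : Nat → Bool) (hnd : l.Nodup) (ha : a ∈ l) :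
    l.countP (fun b => !(a == b) && P b) + (if P a then 1 else 0) = l.countP P := by
  induction l with
  | nil => cases ha
  | cons y t ih =>
    rcases List.nodup_cons.mp hnd with ⟨hy, hndt⟩
    rw [List.countP_cons, List.countP_cons]
    by_cases hay : a = y
    · subst hay
      have hcongr : t.countP (fun b => !(a == b) && P b) = t.countP P := by
        apply List.countP_congr
        intro b hb
        have : (a == b) = false := by simp; rintro rfl; exact hy hb
        simp [this]
      simp only [hcongr, beq_self_eq_true, Bool.not_true, Bool.false_and]
      simp
    · have hat : a ∈ t := by cases ha with | head => exact absurd rfl hay | tail _ h => exact h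
      have := ih hndt hat
      have hne : (a == y) = false := by simp [hay]
      simp only [hne, Bool.not_false, Bool.true_and]
      omega

-- linear sum glue specific to A's per-index value
theorem pvSumLin (s : List Int) (c : Int) (u v : Int → Int) :
    (s.map (fun x => c - u x - 1 + v x)).sum
      = (s.length : Int) * c - (s.map u).sum - (s.length : Int) + (s.map v).sum := by
  induction s with
  | nil => simp
  | cons x t ih => simp only [List.map_cons, List.sum_cons, ih, List.length_cons]; push_cast; ring

-- exchanging A's index loops for direct traversals of s
theorem pvSumOverList (s : List Int) (f : Int → Int) :
    ((List.range s.length).map (fun a => f (s.getD a 0))).sum = (s.map f).sum := by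
  conv_rhs => rw [← pvGetDRange s]
  rw [List.map_map]
  rfl

theorem pvCountOverList (s : List Int) (p : Int → Bool) :
    (List.range s.length).countP (fun b => p (s.getD b 0)) = s.countP p := by
  conv_rhs => rw [← pvGetDRange s]
  rw [List.countP_map]
  rfl

-- A's nested index loop reduced to the common normal form
theorem pvA_eq (s : List Int) (k : Int) :
    notDivByK s k
      = decide ((s.length : Int) * ((s.length : Int) - 1)
          - (pvDfull s k - pvSdiag s k) = (s.length : Int)) := by
  have hinner : ∀ (init i : Int),
      (PySem.List.pyRange 0 (s.length : Int) 1).foldl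
        (fun cnt j => if i ≠ j then
            (if PySem.Int.mod (PySem.List.pyGetD s i 0 + PySem.List.pyGetD s j 0) k ≠ 0
             then cnt + 1 else cnt) else cnt) init
      = init + ((PySem.List.pyRange 0 (s.length : Int) 1).countP
          (fun j => decide (i ≠ j ∧ PySem.Int.mod (PySem.List.pyGetD s i 0 + PySem.List.pyGetD s j 0) k ≠ 0)) : Int) := by
    intro init i
    rw [show (fun (cnt j : Int) => if i ≠ j then
            (if PySem.Int.mod (PySem.List.pyGetD s i 0 + PySem.List.pyGetD s j 0) k ≠ 0
             then cnt + 1 else cnt) else cnt)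
        = (fun (cnt j : Int) =>
            if i ≠ j ∧ PySem.Int.mod (PySem.List.pyGetD s i 0 + PySem.List.pyGetD s j 0) k ≠ 0
            then cnt + 1 else cnt) from by
      funext cnt j
      by_cases h1 : i = j
      · simp [h1]
      · by_cases h2 : PySem.Int.mod (PySem.List.pyGetD s i 0 + PySem.List.pyGetD s j 0) k = 0 <;>
          simp [h1, h2]]
    exact PySem.List.foldl_ite_add_one _ _ _
  have hidx : ∀ a : Nat, a < s.length →
      (((PySem.List.pyRange 0 (s.length : Int) 1).countP
          (fun j => decide (((a : Int)) ≠ j ∧ PySem.Int.mod (PySem.List.pyGetD s (a : Int) 0 + PySem.List.pyGetD s j 0) k ≠ 0))) : Int)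
      = (s.length : Int) - ((s.countP (fun y => decide (k ∣ (s.getD a 0 + y)))) : Int) - 1
          + (if k ∣ (s.getD a 0 + s.getD a 0) then (1:Int) else 0) := by
    intro a ha
    rw [PySem.List.pyRange_zero_natCast, List.countP_map]
    simp only [PySem.List.pyGetD_natCast]
    rw [List.countP_congr (q := fun (b : Nat) => !(a == b) && !(decide (k ∣ (s.getD a 0 + s.getD b 0))))
        (fun b _ => by
          simp [PySem.List.pyGetD_natCast, ← PySem.Int.mod_eq_zero_iff_dvd, List.getD,
            Bool.beq_eq_decide_eq])]
    have hsplit := pvCountPSplit (List.range s.length) a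
      (fun b => !(decide (k ∣ (s.getD a 0 + s.getD b 0)))) (List.nodup_range) (List.mem_range.mpr ha)
    have hcnt : (List.range s.length).countP (fun b => !(decide (k ∣ (s.getD a 0 + s.getD b 0))))
        = s.countP (fun y => !(decide (k ∣ (s.getD a 0 + y)))) := by
      generalize hxv : s.getD a 0 = x
      exact pvCountOverList s (fun y => !(decide (k ∣ (x + y))))
    have hcomp : s.length = s.countP (fun y => decide (k ∣ (s.getD a 0 + y)))
        + s.countP (fun y => !(decide (k ∣ (s.getD a 0 + y)))) := by
      rw [List.length_eq_countP_add_countP (fun y => decide (k ∣ (s.getD a 0 + y)))]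
      congr 1
      apply List.countP_congr; intro y _; simp
    rw [hcnt] at hsplit
    beta_reduce at hsplit
    by_cases hdg : k ∣ (s.getD a 0 + s.getD a 0)
    · have e1 : (!(decide (k ∣ (s.getD a 0 + s.getD a 0)))) = false := by
        rw [decide_eq_true hdg]; rfl
      rw [e1, if_neg (show ¬ (false = true) by simp)] at hsplit
      rw [if_pos hdg]
      omega
    · have e1 : (!(decide (k ∣ (s.getD a 0 + s.getD a 0)))) = true := by
        rw [decide_eq_false hdg]; rfl
      rw [e1, if_pos (show true = true from rfl)] at hsplit
      rw [if_neg hdg]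
      omega
  have hinner2 : ∀ (init i : Int), i ∈ PySem.List.pyRange 0 (s.length : Int) 1 →
      (PySem.List.pyRange 0 (s.length : Int) 1).foldl
        (fun cnt j => if i ≠ j then
            (if PySem.Int.mod (PySem.List.pyGetD s i 0 + PySem.List.pyGetD s j 0) k ≠ 0
             then cnt + 1 else cnt) else cnt) init
      = init + ((s.length : Int) - ((s.countP (fun y => decide (k ∣ (s.getD i.toNat 0 + y)))) : Int) - 1
          + (if k ∣ (s.getD i.toNat 0 + s.getD i.toNat 0) then (1:Int) else 0)) := by
    intro init i hi
    obtain ⟨h0, h1⟩ := PySem.List.mem_pyRange_one.mp hi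
    have hcast : i = ((i.toNat : Nat) : Int) := by omega
    rw [hinner init i, hcast, Int.toNat_natCast]
    exact congrArg (fun t => init + t) (hidx i.toNat (by omega))
  have key : (PySem.List.pyRange 0 (s.length : Int) 1).foldl
        (fun cnt i => (PySem.List.pyRange 0 (s.length : Int) 1).foldl
          (fun cnt j => if i ≠ j then
              (if PySem.Int.mod (PySem.List.pyGetD s i 0 + PySem.List.pyGetD s j 0) k ≠ 0
               then cnt + 1 else cnt) else cnt) cnt) 0
      = (s.length : Int) * ((s.length : Int) - 1) - (pvDfull s k - pvSdiag s k) := by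
    rw [PySem.List.foldl_congr_mem _ _
        (fun (cnt i : Int) => cnt + ((s.length : Int) - ((s.countP (fun y => decide (k ∣ (s.getD i.toNat 0 + y)))) : Int) - 1
          + (if k ∣ (s.getD i.toNat 0 + s.getD i.toNat 0) then (1:Int) else 0)))
        _ (fun acc i hi => hinner2 acc i hi)]
    rw [PySem.List.foldl_add, zero_add]
    rw [PySem.List.pyRange_zero_natCast, List.map_map]
    rw [List.map_congr_left (l := List.range s.length)
        (g := fun (a : Nat) => (fun x => (s.length : Int) - ((s.countP (fun y => decide (k ∣ (x + y)))) : Int) - 1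
          + (if k ∣ (x + x) then (1:Int) else 0)) (s.getD a 0))
        (fun a _ => by simp only [Function.comp_apply, Int.toNat_natCast]; rfl)]
    rw [pvSumOverList s (fun x => (s.length : Int) - ((s.countP (fun y => decide (k ∣ (x + y)))) : Int) - 1
          + (if k ∣ (x + x) then (1:Int) else 0))]
    rw [pvSumLin s ((s.length : Int))
        (fun x => ((s.countP (fun y => decide (k ∣ (x + y)))) : Int))
        (fun x => if k ∣ (x + x) then (1:Int) else 0)]
    have hs : (s.map (fun x => if k ∣ (x + x) then (1:Int) else 0)).sum = pvSdiag s k := by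
      rw [show (fun (x : Int) => if k ∣ (x + x) then (1:Int) else 0)
          = (fun (x : Int) => if (fun x => decide (k ∣ (x + x))) x = true then (1:Int) else 0) from by
        funext x; by_cases h : k ∣ (x + x) <;> simp [h]]
      exact PySem.List.sum_map_ite_one_zero _ _
    rw [hs]
    unfold pvDfull
    ring
  simp only [notDivByK]
  rw [key]

-- B's histogram reduced to the same normal form (k ≠ 0, at least two elements)
theorem pvB_eq (s : List Int) (k : Int) (hk : k ≠ 0) (hl : ¬ ((s.length : Int) ≤ 1)) :
    notDivByK_alt s k
      = decide ((s.length : Int) * ((s.length : Int) - 1)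
          - (pvDfull s k - pvSdiag s k) = (s.length : Int)) := by
  have hfreq : s.foldl (fun d x => d.insert (PySem.Int.mod x k)
        (d.getD (PySem.Int.mod x k) 0 + 1)) PySem.Dict.empty
      = PySem.Dict.counter (s.map (fun x => PySem.Int.mod x k)) := by
    rw [← PySem.Dict.foldl_insert_getD_add_one_eq_counter, List.foldl_map]
  have hdiv : ((PySem.Dict.counter (s.map (fun x => PySem.Int.mod x k))).items.foldl
        (fun acc p => acc + p.2 * (PySem.Dict.counter (s.map (fun x => PySem.Int.mod x k))).getD
          (PySem.Int.mod (-p.1) k) 0) 0)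
      = pvDfull s k := by
    rw [PySem.List.foldl_add, zero_add, PySem.Dict.items_counter, List.map_map]
    calc ((PySem.Set.ofList (s.map (fun x => PySem.Int.mod x k))).map
            ((fun p : Int × Int => p.2 * (PySem.Dict.counter (s.map (fun x => PySem.Int.mod x k))).getD
              (PySem.Int.mod (-p.1) k) 0) ∘ (fun r => (r, ((s.map (fun x => PySem.Int.mod x k)).count r : Int))))).sum
        = ((PySem.Set.ofList (s.map (fun x => PySem.Int.mod x k))).map
            (fun r => (((s.map (fun x => PySem.Int.mod x k)).count r : Int))
              * (((s.map (fun x => PySem.Int.mod x k)).count (PySem.Int.mod (-r) k)) : Int))).sum := by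
          refine congrArg List.sum (List.map_congr_left (fun r _ => ?_))
          show _ * (PySem.Dict.counter _).getD _ 0 = _
          rw [PySem.Dict.getD_counter]
      _ = ((s.map (fun x => PySem.Int.mod x k)).map
            (fun r => (((s.map (fun x => PySem.Int.mod x k)).count (PySem.Int.mod (-r) k)) : Int))).sum :=
          pvSumCount _ _ _ (PySem.Set.nodup_ofList _) (fun x hx => (PySem.Set.mem_ofList _ _).mpr hx)
      _ = pvDfull s k := by
          rw [List.map_map]
          refine congrArg List.sum (List.map_congr_left (fun x _ => ?_))
          show ((s.map (fun x => PySem.Int.mod x k)).count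
              (PySem.Int.mod (-(PySem.Int.mod x k)) k) : Int) = _
          have hmm : PySem.Int.mod (-(PySem.Int.mod x k)) k = PySem.Int.mod (-x) k := by
            rw [pvModCongr _ _ _ hk]
            have := PySem.Int.floordiv_mul_add_mod x k
            exact ⟨PySem.Int.floordiv x k, by linarith⟩
          rw [hmm, List.count, List.countP_map]
          have hpt : ∀ y : Int, ((fun b => b == PySem.Int.mod (-x) k) ∘ (fun x => PySem.Int.mod x k)) y
              = decide (k ∣ (x + y)) := by
            intro y
            show (PySem.Int.mod y k == PySem.Int.mod (-x) k) = decide (k ∣ (x + y))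
            have hiff : (PySem.Int.mod y k = PySem.Int.mod (-x) k) ↔ (k ∣ (x + y)) := by
              rw [pvModCongr _ _ _ hk]
              constructor <;> (intro ⟨c, hc⟩; exact ⟨c, by linarith⟩)
            simp [Bool.beq_eq_decide_eq, hiff]
          rw [List.countP_congr (fun y _ => by rw [hpt y])]
  have hself : (s.foldl (fun acc x => if PySem.Int.mod (2 * x) k = 0 then acc + 1 else acc) 0)
      = pvSdiag s k := by
    rw [PySem.List.foldl_ite_add_one (fun x => PySem.Int.mod (2 * x) k = 0), zero_add]
    unfold pvSdiag
    congr 1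
    apply List.countP_congr
    intro x _
    have h2x : (2 * x) = x + x := by ring
    simp [h2x, PySem.Int.mod_eq_zero_iff_dvd]
  simp only [notDivByK_alt]
  rw [if_neg hl, hfreq, hdiv, hself]

-- ===== VERDICT (by name: the statement is the Claim_ definition above) =====
theorem notDivByK_spec : Claim_equal_notDivByK := by
  intro s k _ hpre
  unfold Spec_notDivByK
  by_cases hl : ((s.length : Int)) ≤ 1
  · match s with
    | [] => rfl
    | [x] =>
      have h01 : PySem.List.pyRange 0 (1:Int) 1 = [0] := by
        rw [PySem.List.pyRange_one_cons (by norm_num)]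
        rw [show ((0:Int)+1) = 1 by norm_num]
        rw [PySem.List.pyRange_one_eq_nil le_rfl]
      simp [notDivByK, notDivByK_alt, h01]
    | x :: y :: t => simp at hl; omega
  · have hk : k ≠ 0 := by
      rcases hpre with hk | hlen
      · exact hk
      · exfalso; apply hl; exact_mod_cast Int.ofNat_le.mpr hlen
    rw [pvA_eq, pvB_eq s k hk hl]
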